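-- pv_equiv track=rewrite | github.com/zezhongzhang2007/homework | HW(5)(2).py | get_matryoshka_list
-- ===== SOURCE A (Python) =====
-- def get_matryoshka_list(list):
--     last_value = 0
--     start = 0
--     end = 0
--     x = 0
--     while x < len(list):
--         e = list[x]
--         if last_value <= e:
--             end += 1
--             last_value = e
--             x += 1
--         elif last_value > e:
--             list[start:end] = [list[start:end]]
--             start += 1
--             list[start] = [list[start]]
--             start += 1
--             last_value = 0
--             x = start
--             end = start
--     list[start:end] = [list[start:end]]
--     return list
-- ===== SOURCE B (Python) =====
-- def get_matryoshka_list(list):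
--     res = []
--     run = []
--     last = 0
--     for e in list:
--         if last <= e:
--             run.append(e)
--             last = e
--         else:
--             res.append(run)
--             res.append([e])
--             run = []
--             last = 0
--     res.append(run)
--     list[:] = res
--     return list
-- ===== Notes on version B (the rewrite author's own statement) =====
-- stated objective: faster
-- what changed: A repeatedly rewrites the list in place via slice assignments and index resets (start/end/x bookkeeping over a mixed int/list buffer, copying slices on every break); B is a plain single forward pass with a result list, a current run and a baseline, no index arithmetic or slice splicing.
import Mathlib
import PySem

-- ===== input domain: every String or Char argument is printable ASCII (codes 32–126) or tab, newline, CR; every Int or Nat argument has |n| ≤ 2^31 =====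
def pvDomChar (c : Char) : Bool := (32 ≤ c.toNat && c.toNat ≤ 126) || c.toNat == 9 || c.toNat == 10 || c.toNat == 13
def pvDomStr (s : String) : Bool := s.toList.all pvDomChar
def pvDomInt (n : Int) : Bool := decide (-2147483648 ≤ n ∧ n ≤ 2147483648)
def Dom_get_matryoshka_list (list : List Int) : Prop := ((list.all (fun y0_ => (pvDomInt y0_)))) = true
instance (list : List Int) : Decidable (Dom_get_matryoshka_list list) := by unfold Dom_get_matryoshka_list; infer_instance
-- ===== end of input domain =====

-- B replaces A's in-place slice-splicing index machine by one forward pass with an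
-- accumulator (objective: simpler). Both Pythons mutate the argument list in place;
-- the equivalence proved here is about the RETURN value.

-- ===== PORT A =====
-- During A's run the Python list holds a mix of ints (unprocessed) and lists (wrapped
-- groups); we model an element as Int ⊕ List Int.

-- the int payload of an element; in every state A reaches, elements read as ints are ints
def pvItemInt (it : Int ⊕ List Int) : Int :=
  match it with
  | .inl n => n
  | .inr _ => 0  -- unreachable in reachable states

-- the group payload of an element at return time; at return every element is a wrapped list
def pvItemGroup (it : Int ⊕ List Int) : List Int :=
  match it with
  | .inl _ => []  -- unreachable: the final slice assignment wraps everything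
  | .inr g => g

-- Python slice assignment l[a:b] = seg; exact for 0 ≤ a ≤ b ≤ len l, which A maintains
def pvSliceAssign (l : List (Int ⊕ List Int)) (a b : Nat) (seg : List (Int ⊕ List Int)) :
    List (Int ⊕ List Int) := l.take a ++ seg ++ l.drop b

-- Python element assignment l[i] = v; exact for 0 ≤ i < len l, which A maintains
def pvSetAt (l : List (Int ⊕ List Int)) (i : Nat) (v : Int ⊕ List Int) :
    List (Int ⊕ List Int) := l.take i ++ [v] ++ l.drop (i + 1)

-- A's while loop, step for step.  The indices start/end/x are nonnegative throughout A's
-- run, so they are carried as Nat.  fuel bounds the number of iterations; each iteration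
-- decreases len(list) - x by exactly 1, so len(list) + 1 iterations always suffice
-- (proved in pvSimLoop below); the fuel-0 branch is never reached.
def pvLoopA : Nat → List (Int ⊕ List Int) → Int → Nat → Nat → Nat →
    List (Int ⊕ List Int) × Nat × Nat
  | 0, l, _, start, end_, _ => (l, start, end_)
  | fuel + 1, l, last_value, start, end_, x =>
    if x < l.length then
      let e := pvItemInt (l.getD x (.inl 0))
      if last_value ≤ e then
        pvLoopA fuel l e start (end_ + 1) (x + 1)
      else  -- Python's elif last_value > e: the only remaining case
        let l1 := pvSliceAssign l start end_ [.inr (((l.take end_).drop start).map pvItemInt)]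
        let start1 := start + 1
        let l2 := pvSetAt l1 start1 (.inr [pvItemInt (l1.getD start1 (.inl 0))])
        let start2 := start1 + 1
        pvLoopA fuel l2 0 start2 start2 start2
    else (l, start, end_)

def get_matryoshka_list (list : List Int) : List (List Int) :=
  let items : List (Int ⊕ List Int) := list.map .inl
  let r := pvLoopA (list.length + 1) items 0 0 0 0
  let l' := r.1
  let start := r.2.1
  let end_ := r.2.2
  -- final list[start:end] = [list[start:end]]
  let l'' := pvSliceAssign l' start end_ [.inr (((l'.take end_).drop start).map pvItemInt)]
  l''.map pvItemGroup

-- ===== PORT B =====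
-- one fold step of Source B's for-loop over state (res, run, last)
def pvStep (p : List (List Int) × List Int × Int) (e : Int) :
    List (List Int) × List Int × Int :=
  if p.2.2 ≤ e then (p.1, p.2.1 ++ [e], e) else (p.1 ++ [p.2.1, [e]], [], 0)

def get_matryoshka_list_alt (list : List Int) : List (List Int) :=
  let q := list.foldl pvStep ([], [], 0)
  q.1 ++ [q.2.1]

-- ===== PRECONDITION & SPEC =====
def Spec_get_matryoshka_list (list : List Int) (out : List (List Int)) : Prop := out = get_matryoshka_list_alt list
instance (list : List Int) (out : List (List Int)) : Decidable (Spec_get_matryoshka_list list out) := by unfold Spec_get_matryoshka_list; infer_instance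

-- ===== CLAIM (what is proved, stated in full; the proofs are below) =====
def Claim_equal_get_matryoshka_list : Prop := ∀ (list : List Int), Dom_get_matryoshka_list list → Spec_get_matryoshka_list list (get_matryoshka_list list)

-- ===== LEMMAS AND PROOFS =====

theorem pvItemInt_inl (n : Int) : pvItemInt (.inl n) = n := rfl

theorem pvMap_inl_int (l : List Int) : (l.map Sum.inl).map pvItemInt = l := by
  simp [List.map_map, Function.comp_def, pvItemInt_inl]

-- Simulation: A's loop on a state whose list splits into wrapped groups followed by the
-- unprocessed ints (current run ++ rest) computes exactly B's fold over rest.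
theorem pvSimLoop (rest : List Int) : ∀ (fuel : Nat) (groups : List (List Int))
    (run : List Int) (last : Int), rest.length < fuel →
    pvLoopA fuel (groups.map .inr ++ (run ++ rest).map .inl) last
      groups.length (groups.length + run.length) (groups.length + run.length)
    = (let q := rest.foldl pvStep (groups, run, last);
       (q.1.map .inr ++ q.2.1.map .inl, q.1.length, q.1.length + q.2.1.length)) := by
  induction rest with
  | nil =>
    intro fuel groups run last hf
    match fuel, hf with
    | f + 1, _ => simp [pvLoopA, List.foldl]
  | cons e rest ih =>
    intro fuel groups run last hf
    match fuel, hf with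
    | f + 1, hf =>
      have hrest : rest.length < f := by simpa using Nat.lt_of_succ_lt_succ hf
      have hx : groups.length + run.length <
          (groups.map (Sum.inr (α := Int)) ++ (run ++ e :: rest).map Sum.inl).length := by
        simp
      have hget : (groups.map (Sum.inr (α := Int)) ++ (run ++ e :: rest).map Sum.inl).getD
          (groups.length + run.length) (.inl 0) = .inl e := by
        rw [List.getD_eq_getElem?_getD, List.getElem?_append_right (by simp)]
        simp
      rw [pvLoopA, if_pos hx, hget]
      simp only [pvItemInt_inl]
      by_cases hle : last ≤ e
      · rw [if_pos hle]
        rw [show (groups.map (Sum.inr (α := Int)) ++ (run ++ e :: rest).map Sum.inl)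
            = groups.map Sum.inr ++ ((run ++ [e]) ++ rest).map Sum.inl by simp]
        rw [show groups.length + run.length + 1 = groups.length + (run ++ [e]).length by simp [Nat.add_assoc]]
        rw [ih f groups (run ++ [e]) e hrest]
        simp [List.foldl_cons, pvStep, hle]
      · rw [if_neg hle]
        have htake : (groups.map (Sum.inr (α := Int)) ++ (run ++ e :: rest).map Sum.inl).take
            (groups.length + run.length) = groups.map Sum.inr ++ run.map Sum.inl := by
          rw [show (groups.map (Sum.inr (α := Int)) ++ (run ++ e :: rest).map Sum.inl)
              = (groups.map Sum.inr ++ run.map Sum.inl) ++ (e :: rest).map Sum.inl by simp]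
          rw [List.take_left' (by simp)]
        have hdrop : (groups.map (Sum.inr (α := Int)) ++ (run ++ e :: rest).map Sum.inl).drop
            (groups.length + run.length) = (e :: rest).map Sum.inl := by
          rw [show (groups.map (Sum.inr (α := Int)) ++ (run ++ e :: rest).map Sum.inl)
              = (groups.map Sum.inr ++ run.map Sum.inl) ++ (e :: rest).map Sum.inl by simp]
          rw [List.drop_left' (by simp)]
        have hl1 : pvSliceAssign (groups.map Sum.inr ++ (run ++ e :: rest).map Sum.inl)
            groups.length (groups.length + run.length)
            [.inr ((((groups.map Sum.inr ++ (run ++ e :: rest).map Sum.inl).take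
              (groups.length + run.length)).drop groups.length).map pvItemInt)]
            = groups.map Sum.inr ++ (.inr run :: .inl e :: rest.map Sum.inl) := by
          unfold pvSliceAssign
          rw [htake, hdrop, List.take_left' (by simp), List.drop_left' (by simp),
              pvMap_inl_int]
          simp
        rw [hl1]
        have hget1 : ((groups.map (Sum.inr (α := Int)) ++
            (.inr run :: .inl e :: rest.map Sum.inl)).getD (groups.length + 1) (.inl 0))
            = .inl e := by
          rw [List.getD_eq_getElem?_getD, List.getElem?_append_right (by simp)]
          simp
        rw [hget1]
        simp only [pvItemInt_inl]
        have hl2 : pvSetAt (groups.map Sum.inr ++ (.inr run :: .inl e :: rest.map Sum.inl))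
            (groups.length + 1) (.inr [e])
            = (groups ++ [run, [e]]).map Sum.inr ++ rest.map Sum.inl := by
          unfold pvSetAt
          rw [show (groups.map (Sum.inr (α := Int)) ++ (.inr run :: .inl e :: rest.map Sum.inl))
              = (groups.map Sum.inr ++ [.inr run]) ++ (.inl e :: rest.map Sum.inl) by simp]
          rw [List.take_left' (by simp)]
          rw [show ((groups.map (Sum.inr (α := Int)) ++ [.inr run]) ++ (.inl e :: rest.map Sum.inl))
              = (groups.map Sum.inr ++ [.inr run, .inl e]) ++ rest.map Sum.inl by simp]
          rw [List.drop_left' (by simp)]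
          simp
        rw [hl2]
        have hih := ih f (groups ++ [run, [e]]) [] 0 hrest
        simp only [List.length_nil, Nat.add_zero, List.nil_append] at hih
        rw [show groups.length + 1 + 1 = (groups ++ [run, [e]]).length by simp]
        rw [hih]
        simp [List.foldl_cons, pvStep, hle]

-- ===== VERDICT (by name: the statement is the Claim_ definition above) =====
theorem pvFinalWrap (g : List (List Int)) (r : List Int) :
    (pvSliceAssign (g.map (Sum.inr (α := Int)) ++ r.map Sum.inl) g.length (g.length + r.length)
      [Sum.inr ((((g.map (Sum.inr (α := Int)) ++ r.map Sum.inl).take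
        (g.length + r.length)).drop g.length).map pvItemInt)]).map pvItemGroup = g ++ [r] := by
  rw [List.take_of_length_le (by simp), List.drop_left' (by simp), pvMap_inl_int]
  unfold pvSliceAssign
  rw [List.take_left' (by simp), List.drop_of_length_le (by simp)]
  simp [pvItemGroup, Function.comp_def]

theorem get_matryoshka_list_spec : Claim_equal_get_matryoshka_list := by
  intro list _
  unfold Spec_get_matryoshka_list get_matryoshka_list get_matryoshka_list_alt
  have h := pvSimLoop list (list.length + 1) [] [] 0 (by omega)
  simp only [List.map_nil, List.nil_append, List.length_nil, Nat.add_zero] at h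
  simp only [h]
  exact pvFinalWrap (list.foldl pvStep ([], [], 0)).1 (list.foldl pvStep ([], [], 0)).2.1
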